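-- pv_equiv track=rewrite | github.com/luao-la/HeSQLNet | my_lib/util/equation.py | _find_sub_prefix_end_id
-- ===== SOURCE A (Python) =====
-- PREFIX_OPERATORS=[
--     "/",
--     "^",
--     "+",
--     "-",
--     "*"
-- ]
--
-- def _find_sub_prefix_end_id(start_id,prefix):
--     '''
--     对反向postfix，找到当前id对应的最小子式的终点
--     :param start_id:
--     :param rerversed_postfix:
--     :return:
--     '''
--     if prefix[start_id] not in PREFIX_OPERATORS:
--         return start_id
--     else:
--         op_num=1
--         num_num=0
--         for i,element in enumerate(prefix[start_id+1:]):
--             if element in PREFIX_OPERATORS: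
--                 op_num+=1
--             else:
--                 num_num+=1
--             if num_num>op_num:
--                 return start_id+i+1
-- ===== SOURCE B (Python) =====
-- PREFIX_OPERATORS=[
--     "/",
--     "^",
--     "+",
--     "-",
--     "*"
-- ]
--
-- def _find_sub_prefix_end_id(start_id, prefix):
--     # Stack-based prefix parser: instead of counting operators vs operands,
--     # keep a stack of "operands still missing" frames (one per pending operator)
--     # and return the index at which the stack empties.
--     if prefix[start_id] not in PREFIX_OPERATORS:
--         return start_id
--     needed = [2]
--     i = start_id + 1
--     while i < len(prefix):
--         if prefix[i] in PREFIX_OPERATORS: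
--             needed.append(2)
--         else:
--             needed[-1] -= 1
--             while needed and needed[-1] == 0:
--                 needed.pop()
--                 if needed:
--                     needed[-1] -= 1
--         if not needed:
--             return i
--         i += 1
--     return None
-- ===== Notes on version B (the rewrite author's own statement) =====
-- stated objective: alternative
-- what changed: Replaces A's single-pass operator/operand counter scan over the slice prefix[start_id+1:] with a stack-based prefix-expression parser that pushes a two-operand frame per operator and returns the index at which the frame stack empties.
import Mathlib
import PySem

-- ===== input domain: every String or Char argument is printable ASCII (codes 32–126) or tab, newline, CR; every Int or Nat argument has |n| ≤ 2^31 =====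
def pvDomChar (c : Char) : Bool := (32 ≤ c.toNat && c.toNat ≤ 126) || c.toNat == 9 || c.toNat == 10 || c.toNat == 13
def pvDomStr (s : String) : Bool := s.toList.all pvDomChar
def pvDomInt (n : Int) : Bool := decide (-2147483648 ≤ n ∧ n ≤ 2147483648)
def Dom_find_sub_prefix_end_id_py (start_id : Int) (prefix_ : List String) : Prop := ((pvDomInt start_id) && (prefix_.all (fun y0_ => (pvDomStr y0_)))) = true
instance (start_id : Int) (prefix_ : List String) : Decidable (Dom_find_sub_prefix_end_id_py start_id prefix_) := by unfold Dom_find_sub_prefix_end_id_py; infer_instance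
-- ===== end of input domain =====

-- B replaces A's operator/operand counter scan by a stack-based prefix parser
-- (a stack of "operands still missing" frames); same cost, different mechanism (objective: alternative).

-- the module constant PREFIX_OPERATORS
def pvOps : List String := ["/", "^", "+", "-", "*"]

-- ===== PORT A =====
-- A's for-loop over enumerate(prefix[start_id+1:]) with counters op_num/num_num;
-- idx carries start_id+i+1. On loop exhaustion Python returns None: that input is
-- excluded by Pre_, the port returns 0 there.
def pvLoopA (op num idx : Int) : List String → Int
  | [] => 0
  | e :: rest =>
    let op' : Int := if e ∈ pvOps then op + 1 else op
    let num' : Int := if e ∈ pvOps then num else num + 1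
    if num' > op' then idx else pvLoopA op' num' (idx + 1) rest

def find_sub_prefix_end_id_py (start_id : Int) (prefix_ : List String) : Int :=
  match PySem.List.pyGet? prefix_ start_id with
  | none => 0  -- Python raises IndexError here; excluded by Pre_
  | some e =>
    if e ∈ pvOps then
      pvLoopA 1 0 (start_id + 1) (PySem.List.slice prefix_ (some (start_id + 1)) none)
    else start_id

-- ===== PORT B =====
-- Source B's inner while-loop: after 'needed[-1] -= 1', pop completed (zero) frames,
-- each completed frame supplying one operand to the frame below.
def pvDrain : List Int → List Int
  | [] => []
  | [x] => if x = 0 then [] else [x]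
  | x :: y :: r => if x = 0 then pvDrain ((y - 1) :: r) else x :: y :: r
termination_by l => l.length

-- Source B's outer while-loop: st is the 'needed' stack (top = head), i the index.
-- Where Python raises IndexError (i < -len) the port returns 0; where Source B
-- returns None (loop exhausted) the port returns 0; both excluded by Pre_.
def pvLoopB (l : List String) (st : List Int) (i : Int) : Int :=
  if i < (l.length : Int) then
    match PySem.List.pyGet? l i with
    | none => 0
    | some e =>
      let st' := if e ∈ pvOps then 2 :: st
                 else (match st with
                       | [] => ([] : List Int)
                       | x :: rest => pvDrain ((x - 1) :: rest))
      if st' = [] then i else pvLoopB l st' (i + 1)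
  else 0
termination_by ((l.length : Int) - i).toNat
decreasing_by omega

def find_sub_prefix_end_id_py_alt (start_id : Int) (prefix_ : List String) : Int :=
  match PySem.List.pyGet? prefix_ start_id with
  | none => 0  -- Python raises IndexError here; excluded by Pre_
  | some e =>
    if e ∈ pvOps then pvLoopB prefix_ [2] (start_id + 1)
    else start_id

-- ===== PRECONDITION & SPEC =====
-- the start of the window Python's slice prefix[start_id+1:] actually scans
def pvWinStart (start_id : Int) (n : Nat) : Nat :=
  if start_id + 1 < 0 then ((n : Int) + start_id + 1).toNat else (start_id + 1).toNat

-- some prefix of the window holds two more operands than operators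
-- (= A's scan reaches 'num_num > op_num' and returns)
def pvTerm (w : List String) : Prop :=
  ∃ m ∈ List.range w.length,
    ((w.take (m + 1)).countP (fun e => decide (e ∈ pvOps))) + 2 ≤
      ((w.take (m + 1)).countP (fun e => decide (e ∉ pvOps)))

-- Pre_ excludes out-of-range start_id (A raises IndexError) and the incomplete
-- expressions on which A's scan exhausts and returns None (not an int).
def Pre_find_sub_prefix_end_id_py (start_id : Int) (prefix_ : List String) : Prop :=
  PySem.Raise.InRange prefix_.length start_id ∧
  ((PySem.List.pyGetD prefix_ start_id "") ∈ pvOps →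
    pvTerm (prefix_.drop (pvWinStart start_id prefix_.length)))

instance (start_id : Int) (prefix_ : List String) : Decidable (Pre_find_sub_prefix_end_id_py start_id prefix_) := by
  unfold Pre_find_sub_prefix_end_id_py pvTerm; infer_instance

def pvWitness_find_sub_prefix_end_id_py : Int × List String := (0, ["+", "1", "2"])

def Spec_find_sub_prefix_end_id_py (start_id : Int) (prefix_ : List String) (out : Int) : Prop := out = find_sub_prefix_end_id_py_alt start_id prefix_
instance (start_id : Int) (prefix_ : List String) (out : Int) : Decidable (Spec_find_sub_prefix_end_id_py start_id prefix_ out) := by unfold Spec_find_sub_prefix_end_id_py; infer_instance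

-- ===== CLAIM (what is proved, stated in full; the proofs are below) =====
def Claim_equal_find_sub_prefix_end_id_py : Prop := ∀ (start_id : Int) (prefix_ : List String), Dom_find_sub_prefix_end_id_py start_id prefix_ → Pre_find_sub_prefix_end_id_py start_id prefix_ → Spec_find_sub_prefix_end_id_py start_id prefix_ (find_sub_prefix_end_id_py start_id prefix_)

-- ===== LEMMAS AND PROOFS =====

-- first index m such that the running (operands - operators) balance over
-- t.take (m+1), started at 1-k, reaches 1: the common specification both loops meet
def pvF : Nat → List String → Option Nat
  | _, [] => none
  | k, e :: r =>
    if e ∉ pvOps ∧ k = 1 then some 0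
    else (pvF (if e ∈ pvOps then k + 1 else k - 1) r).map (· + 1)

-- the sequence of elements Source B's index loop reads from position i onward
def pvSeq (l : List String) (i : Int) : List String :=
  if 0 ≤ i then l.drop i.toNat else l.drop ((l.length : Int) + i).toNat ++ l


theorem pvF_hit {e : String} {k : Nat} (hop : e ∉ pvOps) (hk : k = 1) (r : List String) :
    pvF k (e :: r) = some 0 := by rw [pvF, if_pos ⟨hop, hk⟩]

theorem pvF_op {e : String} {k : Nat} (hop : e ∈ pvOps) (r : List String) :
    pvF k (e :: r) = (pvF (k + 1) r).map (· + 1) := by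
  rw [pvF, if_neg (by tauto), if_pos hop]

theorem pvF_num {e : String} {k : Nat} (hop : e ∉ pvOps) (hk : k ≠ 1) (r : List String) :
    pvF k (e :: r) = (pvF (k - 1) r).map (· + 1) := by
  rw [pvF, if_neg (by tauto), if_neg hop]

theorem pvMatchShift (o : Option Nat) (idx : Int) :
    (match o.map (fun m : Nat => m + 1) with | some m => idx + (m : Int) | none => (0 : Int))
      = (match o with | some m => (idx + 1) + (m : Int) | none => (0 : Int)) := by
  cases o with
  | none => rfl
  | some m =>
    show idx + ((m + 1 : Nat) : Int) = idx + 1 + (m : Int)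
    push_cast; ring

theorem pvStack_len_le_sum (st : List Int) (h : ∀ x ∈ st, 1 ≤ x) :
    (st.length : Int) ≤ st.sum := by
  induction st with
  | nil => simp
  | cons z s ihs =>
    have h1 := h z (by simp)
    have h2 := ihs (fun x hx => h x (by simp [hx]))
    simp only [List.sum_cons, List.length_cons]
    push_cast; omega

theorem pvF_append {k : Nat} {t : List String} {m : Nat} (u : List String)
    (h : pvF k t = some m) : pvF k (t ++ u) = some m := by
  induction t generalizing k m with
  | nil => simp [pvF] at h
  | cons e r ih =>
    simp only [pvF, List.cons_append] at h ⊢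
    by_cases hc : e ∉ pvOps ∧ k = 1
    · rwa [if_pos hc] at h ⊢
    · rw [if_neg hc] at h ⊢
      cases hF : pvF (if e ∈ pvOps then k + 1 else k - 1) r with
      | none => rw [hF] at h; simp at h
      | some m' => rw [hF] at h; rw [ih hF]; exact h

theorem pvTerm_isSome {t : List String} {k : Nat} (hk : 1 ≤ k)
    (h : ∃ m ∈ List.range t.length,
      ((t.take (m + 1)).countP (fun e => decide (e ∈ pvOps))) + k ≤
        ((t.take (m + 1)).countP (fun e => decide (e ∉ pvOps)))) :
    (pvF k t).isSome := by
  induction t generalizing k with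
  | nil => obtain ⟨m, hm, _⟩ := h; simp at hm
  | cons e r ih =>
    obtain ⟨m, hm, hcnt⟩ := h
    rw [List.mem_range] at hm
    by_cases hc : e ∉ pvOps ∧ k = 1
    · simp [pvF, hc]
    · rw [pvF, if_neg hc, Option.isSome_map]
      by_cases hop : e ∈ pvOps
      · -- operator head: balance debt grows
        rw [if_pos hop]
        apply ih (k := k + 1) (by omega)
        cases m with
        | zero => simp [hop] at hcnt
        | succ m' =>
          refine ⟨m', by simp; simpa using hm, ?_⟩
          simp only [List.take_succ_cons, List.countP_cons, hop] at hcnt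
          simp at hcnt ⊢
          omega
      · -- operand head; since the guard failed, k ≥ 2
        have hk2 : 2 ≤ k := by
          rcases Nat.lt_or_ge k 2 with h2 | h2
          · exfalso; exact hc ⟨hop, by omega⟩
          · exact h2
        rw [if_neg hop]
        apply ih (k := k - 1) (by omega)
        cases m with
        | zero => simp [hop] at hcnt; omega
        | succ m' =>
          refine ⟨m', by simp; simpa using hm, ?_⟩
          simp only [List.take_succ_cons, List.countP_cons, hop] at hcnt
          simp at hcnt ⊢
          omega

theorem pvLoopA_eq (t : List String) (op num idx : Int) (h : num ≤ op) :
    pvLoopA op num idx t =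
      (match pvF (op - num + 1).toNat t with
       | some m => idx + (m : Int)
       | none => 0) := by
  induction t generalizing op num idx with
  | nil => simp [pvLoopA, pvF]
  | cons e r ih =>
    by_cases hop : e ∈ pvOps
    · have eA : pvLoopA op num idx (e :: r) = pvLoopA (op + 1) num (idx + 1) r := by
        simp only [pvLoopA, hop, if_true]
        rw [if_neg (by omega : ¬ (num > op + 1))]
      rw [eA, pvF_op hop, pvMatchShift, ih (op + 1) num (idx + 1) (by omega),
          (by omega : (op + 1 - num + 1).toNat = (op - num + 1).toNat + 1)]
    · by_cases heq : num = op
      · have eA : pvLoopA op num idx (e :: r) = idx := by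
          simp only [pvLoopA, hop, if_false]
          rw [if_pos (by omega : num + 1 > op)]
        rw [eA, pvF_hit hop (by omega : (op - num + 1).toNat = 1)]
        simp
      · have eA : pvLoopA op num idx (e :: r) = pvLoopA op (num + 1) (idx + 1) r := by
          simp only [pvLoopA, hop, if_false]
          rw [if_neg (by omega : ¬ (num + 1 > op))]
        rw [eA, pvF_num hop (by omega : (op - num + 1).toNat ≠ 1), pvMatchShift,
            ih op (num + 1) (idx + 1) (by omega),
            (by omega : (op - (num + 1) + 1).toNat = (op - num + 1).toNat - 1)]

-- the cascade of Source B's inner while-loop: empties exactly when every frame needs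
-- exactly one more operand; otherwise it keeps frames ≥ 1 and drops the measure by one
theorem pvDrain_spec (r : List Int) (a : Int) (ha : 0 ≤ a) (hr : ∀ x ∈ r, 1 ≤ x) :
    (a + r.sum - r.length = 0 → pvDrain (a :: r) = []) ∧
    (a + r.sum - r.length ≠ 0 →
      pvDrain (a :: r) ≠ [] ∧ (∀ x ∈ pvDrain (a :: r), 1 ≤ x) ∧
      (pvDrain (a :: r)).sum - (pvDrain (a :: r)).length = a + r.sum - r.length - 1) := by
  induction r generalizing a with
  | nil =>
    constructor
    · intro h0; have : a = 0 := by simpa using h0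
      simp [pvDrain, this]
    · intro hne
      have hA : a ≠ 0 := by simpa using hne
      simp only [pvDrain, if_neg hA]
      refine ⟨by simp, ?_, ?_⟩
      · intro x hx
        simp at hx
        omega
      · simp
  | cons y r' ih =>
    have hy : 1 ≤ y := hr y (by simp)
    have hr' : ∀ x ∈ r', 1 ≤ x := fun x hx => hr x (by simp [hx])
    by_cases hA : a = 0
    · subst hA
      have e1 : pvDrain (0 :: y :: r') = pvDrain ((y - 1) :: r') := by
        simp [pvDrain]
      have key := ih (y - 1) (by omega) hr'
      constructor
      · intro h0
        rw [e1]; apply key.1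
        simp only [List.sum_cons, List.length_cons] at h0
        push_cast at h0 ⊢; omega
      · intro hne
        rw [e1]
        have := key.2 (by simp only [List.sum_cons, List.length_cons] at hne; push_cast at hne ⊢; omega)
        refine ⟨this.1, this.2.1, ?_⟩
        rw [this.2.2]
        simp only [List.sum_cons, List.length_cons]
        push_cast; omega
    · have e1 : pvDrain (a :: y :: r') = a :: y :: r' := by
        simp [pvDrain, hA]
      constructor
      · intro h0
        exfalso
        have hsum : 0 ≤ r'.sum - r'.length := by
          have := pvStack_len_le_sum r' hr'
          omega
        simp only [List.sum_cons, List.length_cons] at h0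
        push_cast at h0; omega
      · intro _
        rw [e1]
        refine ⟨by simp, ?_, by simp only [List.sum_cons, List.length_cons]; push_cast; omega⟩
        intro x hx
        simp at hx
        rcases hx with h | h | h
        · omega
        · omega
        · exact hr' x h

theorem pvSeq_cons {l : List String} {i : Int} (h1 : -(l.length : Int) ≤ i)
    (h2 : i < (l.length : Int)) :
    ∃ e, PySem.List.pyGet? l i = some e ∧ pvSeq l i = e :: pvSeq l (i + 1) := by
  by_cases hi : 0 ≤ i
  · have hlt : i.toNat < l.length := by omega
    refine ⟨l[i.toNat], ?_, ?_⟩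
    · rw [PySem.List.pyGet?_of_nonneg l hi]
      simp [List.getElem?_eq_getElem hlt]
    · have e1 : pvSeq l i = l.drop i.toNat := by simp [pvSeq, hi]
      have e2 : pvSeq l (i + 1) = l.drop (i.toNat + 1) := by
        have : (i + 1).toNat = i.toNat + 1 := by omega
        simp [pvSeq, this, (by omega : (0:Int) ≤ i + 1)]
      rw [e1, e2, List.drop_eq_getElem_cons hlt]
  · have hk : 0 < (-i).toNat := by omega
    have hkle : (-i).toNat ≤ l.length := by omega
    have hidx : ((l.length : Int) + i).toNat = l.length - (-i).toNat := by omega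
    have hlt : ((l.length : Int) + i).toNat < l.length := by omega
    refine ⟨l[((l.length : Int) + i).toNat], ?_, ?_⟩
    · rw [← List.getElem?_eq_getElem hlt]
      rw [(by omega : i = -(((-i).toNat : Nat) : Int)), PySem.List.pyGet?_neg_natCast l _ hk hkle]
      congr 1
      omega
    · have e1 : pvSeq l i = l.drop (((l.length : Int) + i).toNat) ++ l := by
        simp [pvSeq, (by omega : ¬ (0:Int) ≤ i)]
      rw [e1, List.drop_eq_getElem_cons hlt, List.cons_append]
      congr 1
      by_cases hi1 : 0 ≤ i + 1
      · have hz : i = -1 := by omega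
        have : ((l.length : Int) + i).toNat + 1 = l.length := by omega
        rw [this]
        simp [pvSeq, hz]
      · have : pvSeq l (i + 1) = l.drop (((l.length : Int) + (i+1)).toNat) ++ l := by
          simp [pvSeq, hi1]
        rw [this]
        congr 2
        omega

theorem pvLoopB_eq (l : List String) (j : Nat) :
    ∀ (i : Int) (st : List Int), ((l.length : Int) - i).toNat ≤ j →
    -(l.length : Int) ≤ i → st ≠ [] → (∀ x ∈ st, 1 ≤ x) →
    pvLoopB l st i =
      (match pvF (st.sum - (st.length : Int) + 1).toNat (pvSeq l i) with
       | some m => i + (m : Int)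
       | none => 0) := by
  induction j with
  | zero =>
    intro i st hj hi hne hpos
    rw [pvLoopB.eq_def, if_neg (by omega : ¬ i < (l.length : Int))]
    have hseq0 : pvSeq l i = [] := by
      simp only [pvSeq, if_pos (by omega : (0:Int) ≤ i)]
      simp only [List.drop_eq_nil_iff]
      omega
    rw [hseq0]
    simp [pvF]
  | succ j ih =>
    intro i st hj hi hne hpos
    by_cases hlt : i < (l.length : Int)
    · obtain ⟨e, hget, hseq⟩ := pvSeq_cons hi hlt
      have hsum := pvStack_len_le_sum st hpos
      rw [hseq]
      by_cases hop : e ∈ pvOps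
      · -- push a frame
        have eL : pvLoopB l st i = pvLoopB l (2 :: st) (i + 1) := by
          conv_lhs => rw [pvLoopB.eq_def]
          rw [if_pos hlt, hget]
          simp only [hop, if_true]
          rw [if_neg (by simp : ¬ (2 :: st : List Int) = [])]
        have hpos2 : ∀ x ∈ (2 :: st : List Int), 1 ≤ x := by
          intro x hx
          rcases List.mem_cons.mp hx with h | h
          · omega
          · exact hpos x h
        have keq : ((2 :: st : List Int).sum - (((2 :: st : List Int).length : Nat) : Int) + 1).toNat
            = (st.sum - (st.length : Int) + 1).toNat + 1 := by
          simp only [List.sum_cons, List.length_cons]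
          push_cast; omega
        rw [eL, ih (i + 1) (2 :: st) (by omega) (by omega) (by simp) hpos2, keq,
            pvF_op hop, pvMatchShift]
      · -- operand: drain the stack
        obtain ⟨x, rest, rfl⟩ : ∃ x rest, st = x :: rest := by
          cases st with
          | nil => exact absurd rfl hne
          | cons x rest => exact ⟨x, rest, rfl⟩
        have hx1 : 1 ≤ x := hpos x (by simp)
        have hrest : ∀ z ∈ rest, 1 ≤ z := fun z hz => hpos z (by simp [hz])
        have hdr := pvDrain_spec rest (x - 1) (by omega) hrest
        simp only [List.sum_cons, List.length_cons, Nat.cast_add, Nat.cast_one] at hsum ⊢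
        by_cases hz : x + rest.sum - ((rest.length : Int) + 1) = 0
        · -- the stack empties: this is the first hit
          have hde : pvDrain ((x - 1) :: rest) = [] := hdr.1 (by omega)
          have eL : pvLoopB l (x :: rest) i = i := by
            conv_lhs => rw [pvLoopB.eq_def]
            rw [if_pos hlt, hget]
            simp only [hop, if_false]
            rw [if_pos hde]
          rw [eL, pvF_hit hop (by omega : (x + rest.sum - ((rest.length : Int) + 1) + 1).toNat = 1)]
          simp
        · have hd := hdr.2 (by omega)
          have eL : pvLoopB l (x :: rest) i = pvLoopB l (pvDrain ((x - 1) :: rest)) (i + 1) := by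
            conv_lhs => rw [pvLoopB.eq_def]
            rw [if_pos hlt, hget]
            simp only [hop, if_false]
            rw [if_neg hd.1]
          have keq : ((pvDrain ((x - 1) :: rest)).sum - (((pvDrain ((x - 1) :: rest)).length : Nat) : Int) + 1).toNat
              = (x + rest.sum - ((rest.length : Int) + 1) + 1).toNat - 1 := by
            have := hd.2.2
            omega
          rw [eL, ih (i + 1) _ (by omega) (by omega) hd.1 hd.2.1, keq,
              pvF_num hop (by omega : (x + rest.sum - ((rest.length : Int) + 1) + 1).toNat ≠ 1),
              pvMatchShift]
    · rw [pvLoopB.eq_def, if_neg hlt]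
      have hseq0 : pvSeq l i = [] := by
        simp only [pvSeq, if_pos (by omega : (0:Int) ≤ i)]
        simp only [List.drop_eq_nil_iff]
        omega
      rw [hseq0]
      simp [pvF]

-- ===== VERDICT (by name: the statement is the Claim_ definition above) =====
theorem find_sub_prefix_end_id_py_spec : Claim_equal_find_sub_prefix_end_id_py := by
  intro s l _dom pre
  obtain ⟨hin, hterm⟩ := pre
  unfold Spec_find_sub_prefix_end_id_py
  unfold find_sub_prefix_end_id_py find_sub_prefix_end_id_py_alt
  have hrange : -(l.length : Int) ≤ s ∧ s < (l.length : Int) := by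
    simpa [PySem.Raise.InRange] using hin
  obtain ⟨e, hget⟩ : ∃ e, PySem.List.pyGet? l s = some e := by
    cases hg : PySem.List.pyGet? l s with
    | none =>
      exfalso
      rw [PySem.List.pyGet?_eq_none_iff] at hg
      exact hg hin
    | some e => exact ⟨e, rfl⟩
  rw [hget]
  simp only []
  by_cases hop : e ∈ pvOps
  · rw [if_pos hop, if_pos hop]
    -- A raises no IndexError and pvTerm holds on the scanned window
    have hgetD : PySem.List.pyGetD l s "" = e := by
      simp [PySem.List.pyGetD, hget]
    have hT : pvTerm (l.drop (pvWinStart s l.length)) := hterm (hgetD ▸ hop)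
    set w := l.drop (pvWinStart s l.length) with hw
    obtain ⟨m, hFm⟩ : ∃ m, pvF 2 w = some m := by
      have := pvTerm_isSome (t := w) (k := 2) (by omega) hT
      cases hF : pvF 2 w with
      | none => rw [hF] at this; simp at this
      | some m => exact ⟨m, rfl⟩
    -- A's side: the slice is exactly the window
    have hslice : PySem.List.slice l (some (s + 1)) none = w := by
      by_cases hs1 : 0 ≤ s + 1
      · rw [PySem.List.slice_from l hs1, hw]
        unfold pvWinStart
        rw [if_neg (by omega)]
      · rw [PySem.List.slice_some_none l (s + 1)]
        have hk : 0 < (-(s+1)).toNat := by omega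
        have : s + 1 = -((((-(s+1)).toNat : Nat)) : Int) := by omega
        rw [this, PySem.List.clampIdx_neg_natCast l.length _ hk, hw]
        unfold pvWinStart
        rw [if_pos (by omega : s + 1 < 0)]
        congr 1
        omega
    rw [hslice]
    rw [pvLoopA_eq w 1 0 (s + 1) (by omega)]
    have h2 : ((1 : Int) - 0 + 1).toNat = 2 := by decide
    rw [h2, hFm]
    -- B's side
    rw [pvLoopB_eq l (((l.length : Int) - (s + 1)).toNat) (s + 1) [2] (le_refl _)
        (by omega) (by simp) (by intro x hx; simp at hx; omega)]
    have hk2 : (([2] : List Int).sum - (([2] : List Int).length : Int) + 1).toNat = 2 := by decide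
    rw [hk2]
    have hseqF : pvF 2 (pvSeq l (s + 1)) = some m := by
      by_cases hs1 : 0 ≤ s + 1
      · have : pvSeq l (s + 1) = w := by
          simp only [pvSeq, if_pos hs1, hw]
          unfold pvWinStart
          rw [if_neg (by omega)]
        rw [this, hFm]
      · have : pvSeq l (s + 1) = w ++ l := by
          simp only [pvSeq, if_neg hs1, hw]
          unfold pvWinStart
          rw [if_pos (by omega : s + 1 < 0)]
          congr 2
          omega
        rw [this]
        exact pvF_append l hFm
    rw [hseqF]
  · rw [if_neg hop, if_neg hop]

theorem find_sub_prefix_end_id_py_witness_ok :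
    Dom_find_sub_prefix_end_id_py pvWitness_find_sub_prefix_end_id_py.1 pvWitness_find_sub_prefix_end_id_py.2 ∧
    Pre_find_sub_prefix_end_id_py pvWitness_find_sub_prefix_end_id_py.1 pvWitness_find_sub_prefix_end_id_py.2 := by
  constructor <;> decide
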